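-- pv_equiv track=rewrite | github.com/syurskyi/Algorithms_and_Data_Structure | _algorithms_challenges/leetcode/LeetcodePythonProject/leetcode_0801_0850/LeetCode809_ExpressiveWords.py | isstretchy
-- ===== SOURCE A (Python) =====
-- def isstretchy(s0, s):
--     m, n = len(s0), len(s)
--     if m > n: return False
--     if m == n and s0 != s: return False
--     i, j = 0, 0
--     flag = True
--     while i < m and j < n:
--         if s0[i] == s[j]:
--             i0, j0 = i, j
--             while i0 < m and s0[i0] == s0[i]:
--                 i0 += 1
--             while j0 < n and s[j0] == s[j]:
--                 j0 += 1
--             if j0-j < 3 and s0[i:i0] != s[j:j0]: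
--                 flag = False
--                 break
--             i, j = i0, j0
--         else:
--             break
--     if i == m and j == n and flag:
--         return True
--     return False
-- ===== SOURCE B (Python) =====
-- def _rle(s):
--     """Run-length encode s as a list of (char, count), by recursion on runs."""
--     if not s:
--         return []
--     k = 1
--     while k < len(s) and s[k] == s[0]:
--         k += 1
--     return [(s[0], k)] + _rle(s[k:])
--
-- def isstretchy(s0, s):
--     if len(s0) > len(s):
--         return False
--     if len(s0) == len(s) and s0 != s:
--         return False
--     g0 = _rle(s0)
--     g = _rle(s)
--     if len(g0) != len(g):
--         return False
--     return all(c0 == c and (k >= 3 or k == k0)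
--                for (c0, k0), (c, k) in zip(g0, g))
-- ===== Notes on version B (the rewrite author's own statement) =====
-- stated objective: simpler
-- what changed: Replaces A's interleaved two-pointer scan with nested run-extension loops by a build-then-compare decomposition: run-length encode both strings, then check the group pairs with the rule char-equal and (count>=3 or counts equal).
import Mathlib
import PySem

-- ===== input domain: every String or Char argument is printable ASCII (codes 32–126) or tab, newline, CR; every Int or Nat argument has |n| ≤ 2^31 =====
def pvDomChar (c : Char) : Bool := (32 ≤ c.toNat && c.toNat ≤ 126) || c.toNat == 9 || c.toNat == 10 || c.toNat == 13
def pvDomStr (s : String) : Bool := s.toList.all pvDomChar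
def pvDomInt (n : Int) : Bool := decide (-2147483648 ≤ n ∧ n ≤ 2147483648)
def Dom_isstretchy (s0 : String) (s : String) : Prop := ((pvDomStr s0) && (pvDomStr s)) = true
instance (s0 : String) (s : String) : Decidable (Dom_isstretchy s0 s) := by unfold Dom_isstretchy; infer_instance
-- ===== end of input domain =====

-- B replaces A's interleaved two-pointer scan with build-then-compare run-length encodings; objective: simpler decomposition (same cost).

-- ===== PORT A =====
-- A's inner runs: 'while i0 < m and s0[i0] == s0[i]: i0 += 1' (and the same for j0)
def runEnd (cs : List Char) (c : Char) (k : Nat) : Nat :=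
  if h : k < cs.length ∧ cs.getD k ' ' = c then runEnd cs c (k + 1) else k
termination_by cs.length - k
decreasing_by omega

-- termination helper for loopA (cited by decreasing_by)
theorem runEnd_ge (cs : List Char) (c : Char) (k : Nat) : k ≤ runEnd cs c k := by
  induction k using runEnd.induct cs c with
  | case1 k hk ih => rw [runEnd, dif_pos hk]; omega
  | case2 k hk => rw [runEnd, dif_neg hk]

-- A's outer 'while i < m and j < n' loop; returns (flag, i, j) at loop exit
def loopA (cs0 cs : List Char) (i j : Nat) : Bool × Nat × Nat :=
  if h : i < cs0.length ∧ j < cs.length then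
    if cs0.getD i ' ' = cs.getD j ' ' then
      if runEnd cs (cs.getD j ' ') j - j < 3 ∧
          PySem.List.slice cs0 (some (i : Int)) (some ((runEnd cs0 (cs0.getD i ' ') i : Nat) : Int)) ≠
            PySem.List.slice cs (some (j : Int)) (some ((runEnd cs (cs.getD j ' ') j : Nat) : Int)) then
        (false, i, j)
      else loopA cs0 cs (runEnd cs0 (cs0.getD i ' ') i) (runEnd cs (cs.getD j ' ') j)
    else (true, i, j)
  else (true, i, j)
termination_by cs.length - j
decreasing_by
  have h1 : runEnd cs (cs.getD j ' ') j = runEnd cs (cs.getD j ' ') (j + 1) := by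
    rw [runEnd, dif_pos ⟨h.2, rfl⟩]
  have h2 := runEnd_ge cs (cs.getD j ' ') (j + 1)
  have h3 := h.2
  omega

def isstretchy (s0 : String) (s : String) : Bool :=
  let cs0 := s0.toList
  let cs := s.toList
  let m := cs0.length
  let n := cs.length
  if m > n then false
  else if m = n ∧ s0 ≠ s then false
  else
    match loopA cs0 cs 0 0 with
    | (flag, i, j) => if i = m ∧ j = n ∧ flag = true then true else false

-- ===== PORT B =====
-- B's inner counter: 'k = 1; while k < len(s) and s[k] == s[0]: k += 1' gives k = 1 + prefLen rest s[0]
def prefLen : List Char → Char → Nat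
  | [], _ => 0
  | x :: xs, c => if x = c then 1 + prefLen xs c else 0

-- B's recursive run-length encoder _rle: [(s[0], k)] + _rle(s[k:])
def rleB : List Char → List (Char × Nat)
  | [] => []
  | c :: rest =>
      (c, 1 + prefLen rest c) :: rleB ((c :: rest).drop (1 + prefLen rest c))
termination_by cs => cs.length
decreasing_by simp

def isstretchy_alt (s0 : String) (s : String) : Bool :=
  if s0.toList.length > s.toList.length then false
  else if s0.toList.length = s.toList.length ∧ s0 ≠ s then false
  else
    let g0 := rleB s0.toList
    let g := rleB s.toList
    if g0.length ≠ g.length then false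
    else (g0.zip g).all fun p => (p.1.1 == p.2.1) && (decide (3 ≤ p.2.2) || p.2.2 == p.1.2)

-- ===== PRECONDITION & SPEC =====
def Spec_isstretchy (s0 : String) (s : String) (out : Bool) : Prop := out = isstretchy_alt s0 s
instance (s0 : String) (s : String) (out : Bool) : Decidable (Spec_isstretchy s0 s out) := by unfold Spec_isstretchy; infer_instance

-- ===== CLAIM (what is proved, stated in full; the proofs are below) =====
def Claim_equal_isstretchy : Prop := ∀ (s0 : String) (s : String), Dom_isstretchy s0 s → Spec_isstretchy s0 s (isstretchy s0 s)

-- ===== LEMMAS AND PROOFS =====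

-- recursive pairwise comparison of group lists (proof-only reference form)
def checkG : List (Char × Nat) → List (Char × Nat) → Bool
  | [], [] => true
  | [], _ :: _ => false
  | _ :: _, [] => false
  | (c0, k0) :: g0, (c, k) :: g =>
      ((c0 == c) && (decide (3 ≤ k) || k == k0)) && checkG g0 g

theorem prefLen_le (xs : List Char) (c : Char) : prefLen xs c ≤ xs.length := by
  induction xs with
  | nil => simp [prefLen]
  | cons x xs ih => simp only [prefLen, List.length_cons]; split <;> omega

theorem take_prefLen (xs : List Char) (c : Char) :
    xs.take (prefLen xs c) = List.replicate (prefLen xs c) c := by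
  induction xs with
  | nil => simp [prefLen]
  | cons x xs ih =>
      simp only [prefLen]
      split
      · next hx => subst hx; simp [List.replicate_succ, Nat.add_comm 1, ih]
      · simp

theorem runEnd_eq (cs : List Char) (c : Char) (k : Nat) :
    runEnd cs c k = k + prefLen (cs.drop k) c := by
  induction k using runEnd.induct cs c with
  | case1 k hk ih =>
      rw [runEnd, dif_pos hk, ih, List.drop_eq_getElem_cons hk.1]
      have hgd : cs.getD k ' ' = cs[k] := List.getD_eq_getElem cs ' ' hk.1
      simp only [prefLen, hgd ▸ hk.2, if_pos]
      omega
  | case2 k hk =>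
      rw [runEnd, dif_neg hk]
      rcases Nat.lt_or_ge k cs.length with hlt | hge
      · rw [List.drop_eq_getElem_cons hlt]
        have hgd : cs.getD k ' ' = cs[k] := List.getD_eq_getElem cs ' ' hlt
        have hne : ¬ cs[k] = c := fun hh => hk ⟨hlt, by rw [hgd, hh]⟩
        simp [prefLen, hne]
      · rw [List.drop_of_length_le hge]; simp [prefLen]

theorem checkG_eq_zip_all (g0 g : List (Char × Nat)) :
    checkG g0 g =
      if g0.length ≠ g.length then false
      else (g0.zip g).all fun p => (p.1.1 == p.2.1) && (decide (3 ≤ p.2.2) || p.2.2 == p.1.2) := by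
  induction g0 generalizing g with
  | nil => cases g <;> simp [checkG]
  | cons a g0 ih =>
      cases g with
      | nil => simp [checkG]
      | cons b g =>
          obtain ⟨c0, k0⟩ := a; obtain ⟨c, k⟩ := b
          simp only [checkG, ih, List.zip_cons_cons, List.all_cons, List.length_cons]
          by_cases hl : g0.length = g.length
          · simp [hl, Bool.and_comm, Bool.and_assoc]
          · simp [hl]

-- canonical value of runEnd at the start of a run
theorem runEnd_canon (cs : List Char) (j : Nat) (hj : j < cs.length) :
    runEnd cs (cs.getD j ' ') j = j + (1 + prefLen (cs.drop (j + 1)) cs[j]) := by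
  rw [runEnd_eq, List.drop_eq_getElem_cons hj]
  rw [List.getD_eq_getElem cs ' ' hj]
  simp [prefLen]

-- the slice s[j:j0] of a run is a replicate of the run's character
theorem slice_runEnd (cs : List Char) (j : Nat) (hj : j < cs.length) :
    PySem.List.slice cs (some (j : Int)) (some ((runEnd cs (cs.getD j ' ') j : Nat) : Int)) =
      List.replicate (1 + prefLen (cs.drop (j + 1)) cs[j]) cs[j] := by
  rw [PySem.List.slice_natCast, runEnd_canon cs j hj]
  have h1 : j + (1 + prefLen (cs.drop (j + 1)) cs[j]) - j = 1 + prefLen (cs.drop (j + 1)) cs[j] := by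
    omega
  rw [h1, List.drop_eq_getElem_cons hj, Nat.add_comm 1, List.take_succ_cons, take_prefLen,
    List.replicate_succ]

theorem loopA_eq (cs0 cs : List Char) (i j : Nat) (hi : i ≤ cs0.length) (hj : j ≤ cs.length) :
    (match loopA cs0 cs i j with
      | (flag, i', j') => if i' = cs0.length ∧ j' = cs.length ∧ flag = true then true else false) =
      checkG (rleB (cs0.drop i)) (rleB (cs.drop j)) := by
  induction i, j using loopA.induct cs0 cs with
  | case1 i j h hc hfail =>
      rw [loopA, dif_pos h, if_pos hc, if_pos hfail]
      have hi' : i < cs0.length := h.1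
      have hj' : j < cs.length := h.2
      have hg0 : cs0.getD i ' ' = cs0[i] := List.getD_eq_getElem cs0 ' ' hi'
      have hg1 : cs.getD j ' ' = cs[j] := List.getD_eq_getElem cs ' ' hj'
      have hchar : cs0[i] = cs[j] := by rw [← hg0, ← hg1, hc]
      obtain ⟨hf1, hf2⟩ := hfail
      rw [runEnd_canon cs j hj'] at hf1
      rw [slice_runEnd cs0 i hi', slice_runEnd cs j hj'] at hf2
      have h3 : ¬ (3 ≤ 1 + prefLen (cs.drop (j + 1)) cs[j]) := by omega
      rw [hchar] at hf2
      have hKne : prefLen (cs.drop (j + 1)) cs[j] ≠ prefLen (cs0.drop (i + 1)) cs[j] := by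
        intro heq
        exact hf2 (by rw [heq])
      rw [List.drop_eq_getElem_cons hi', List.drop_eq_getElem_cons hj', rleB, rleB]
      simp only [checkG]
      simp [hchar, h3, hi'.ne]
      intro heq
      exact absurd heq hKne
  | case2 i j h hc hfail ih =>
      rw [loopA, dif_pos h, if_pos hc, if_neg hfail]
      have hi' : i < cs0.length := h.1
      have hj' : j < cs.length := h.2
      have hg0 : cs0.getD i ' ' = cs0[i] := List.getD_eq_getElem cs0 ' ' hi'
      have hg1 : cs.getD j ' ' = cs[j] := List.getD_eq_getElem cs ' ' hj'
      have hchar : cs0[i] = cs[j] := by rw [← hg0, ← hg1, hc]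
      have hca := runEnd_canon cs0 i hi'
      have hcb := runEnd_canon cs j hj'
      have hP0 := prefLen_le (cs0.drop (i + 1)) cs0[i]
      have hP1 := prefLen_le (cs.drop (j + 1)) cs[j]
      simp only [List.length_drop] at hP0 hP1
      rw [ih (by rw [hca]; omega) (by rw [hcb]; omega), hca, hcb]
      rw [List.drop_eq_getElem_cons hi', List.drop_eq_getElem_cons hj', rleB, rleB]
      have hd0 : (cs0[i] :: cs0.drop (i + 1)).drop (1 + prefLen (cs0.drop (i + 1)) cs0[i]) =
          cs0.drop (i + (1 + prefLen (cs0.drop (i + 1)) cs0[i])) := by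
        rw [Nat.add_comm 1, List.drop_succ_cons, List.drop_drop]
        congr 1
        omega
      have hd1 : (cs[j] :: cs.drop (j + 1)).drop (1 + prefLen (cs.drop (j + 1)) cs[j]) =
          cs.drop (j + (1 + prefLen (cs.drop (j + 1)) cs[j])) := by
        rw [Nat.add_comm 1, List.drop_succ_cons, List.drop_drop]
        congr 1
        omega
      rw [hd0, hd1]
      simp only [checkG]
      have hhead : ((cs0[i] == cs[j]) &&
          (decide (3 ≤ 1 + prefLen (cs.drop (j + 1)) cs[j]) ||
            (1 + prefLen (cs.drop (j + 1)) cs[j] == 1 + prefLen (cs0.drop (i + 1)) cs0[i]))) = true := by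
        simp only [hchar, beq_self_eq_true, Bool.true_and]
        rw [not_and_or] at hfail
        rcases hfail with hf | hf
        · have h3 : 3 ≤ 1 + prefLen (cs.drop (j + 1)) cs[j] := by
            rw [runEnd_canon cs j hj'] at hf
            omega
          simp [h3]
        · rw [not_not] at hf
          rw [slice_runEnd cs0 i hi', slice_runEnd cs j hj'] at hf
          have hlen := congrArg List.length hf
          simp only [List.length_replicate] at hlen
          have hx : prefLen (cs0.drop (i + 1)) cs[j] = prefLen (cs0.drop (i + 1)) cs0[i] := by
            rw [hchar]
          rw [hx, ← hlen]
          simp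
      rw [hhead, Bool.true_and]
  | case3 i j h hc =>
      rw [loopA, dif_pos h, if_neg hc]
      have hi' : i < cs0.length := h.1
      have hj' : j < cs.length := h.2
      rw [List.drop_eq_getElem_cons hi', List.drop_eq_getElem_cons hj', rleB, rleB]
      simp only [checkG]
      have hne : ¬ cs0[i] = cs[j] := by
        rw [← List.getD_eq_getElem cs0 ' ' hi', ← List.getD_eq_getElem cs ' ' hj']
        exact hc
      simp [hne, hi'.ne]
  | case4 i j h =>
      rw [loopA, dif_neg h]
      rcases Nat.lt_or_ge i cs0.length with hi' | hge0
      · have hjn : j = cs.length := by omega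
        subst hjn
        rw [List.drop_eq_getElem_cons hi', List.drop_of_length_le (le_refl _), rleB, rleB]
        simp [checkG, hi'.ne]
      · have him : i = cs0.length := by omega
        subst him
        rw [List.drop_of_length_le (le_refl _), rleB]
        rcases Nat.lt_or_ge j cs.length with hj' | hge1
        · rw [List.drop_eq_getElem_cons hj', rleB]
          simp [checkG, hj'.ne]
        · have hjn : j = cs.length := by omega
          subst hjn
          rw [List.drop_of_length_le (le_refl _), rleB]
          simp [checkG]

-- ===== VERDICT (by name: the statement is the Claim_ definition above) =====
theorem isstretchy_spec : Claim_equal_isstretchy := by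
  intro s0 s _hdom
  unfold Spec_isstretchy isstretchy isstretchy_alt
  have hmain := loopA_eq s0.toList s.toList 0 0 (Nat.zero_le _) (Nat.zero_le _)
  rw [checkG_eq_zip_all] at hmain
  simp only [List.drop_zero] at hmain
  simp at hmain ⊢
  simp [hmain]
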